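-- pv_equiv track=rewrite | github.com/nvmexp/lw_firmware | tools/mods/tools/fatool/fatool_libs/FailureStrategy.py | ExtractFsMaskFromOldCommand
-- ===== SOURCE A (Python) =====
-- def ExtractFsMaskFromOldCommand(old_command):
--     old_command_lst = old_command.split(" ")
--     # Find the indexes of "-floorsweep"
--     fs_arg_indexes_lst = [index for (index, value) in enumerate(old_command_lst) if value == "-floorsweep"]
--
--     # Extract all fs mask and combine them together
--     fs_arg_str = ""
--     for index in fs_arg_indexes_lst:
--         if (index + 1) < len(old_command_lst):
--             fs_arg_str += old_command_lst[index + 1]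
--             fs_arg_str += ":"
--     fs_arg_str = fs_arg_str.rstrip(':')
--
--     # Remove all fs args in the original command
--     old_command_without_fs = ""
--     for i in range(len(old_command_lst)):
--         if (i in fs_arg_indexes_lst or (i - 1) in fs_arg_indexes_lst):
--             continue
--         else:
--             old_command_without_fs += old_command_lst[i]
--             old_command_without_fs += ' '
--     old_command_without_fs = old_command_without_fs.rstrip(' ')
--
--     return (fs_arg_str, old_command_without_fs)
-- ===== SOURCE B (Python) =====
-- def ExtractFsMaskFromOldCommand(old_command):
--     # One combined pass with a lookbehind on the previous token:
--     # a token following "-floorsweep" is a mask (collected), and both the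
--     # "-floorsweep" token and its mask are dropped from the rebuilt command.
--     fs_arg_str = ""
--     command = ""
--     prev = ""
--     for tok in old_command.split(" "):
--         if prev == "-floorsweep":
--             fs_arg_str += tok + ":"
--         if tok != "-floorsweep" and prev != "-floorsweep":
--             command += tok + " "
--         prev = tok
--     return (fs_arg_str.rstrip(':'), command.rstrip(' '))
-- ===== Notes on version B (the rewrite author's own statement) =====
-- stated objective: simpler
-- what changed: A builds a list of the flag's indices and then makes two more index-based passes (mask extraction by index lookup, command rebuild with an inner list-membership scan per position); B is a single combined pass over the tokens tracking only the previous token, with no index list and no membership scans.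
import Mathlib
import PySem

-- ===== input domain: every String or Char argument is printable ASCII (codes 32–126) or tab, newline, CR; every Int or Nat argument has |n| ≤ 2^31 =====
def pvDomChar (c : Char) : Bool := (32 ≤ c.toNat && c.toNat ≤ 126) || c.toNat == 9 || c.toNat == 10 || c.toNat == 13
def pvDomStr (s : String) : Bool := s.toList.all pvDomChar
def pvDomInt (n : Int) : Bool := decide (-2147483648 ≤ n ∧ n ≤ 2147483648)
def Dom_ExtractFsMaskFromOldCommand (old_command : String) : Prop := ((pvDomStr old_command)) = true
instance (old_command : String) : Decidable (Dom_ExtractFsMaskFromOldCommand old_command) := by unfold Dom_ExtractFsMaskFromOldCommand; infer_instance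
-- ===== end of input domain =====

-- B replaces A's three index-based passes (flag index list, masks by index lookup,
-- rebuild by index membership) with one combined pass over the tokens tracking the previous token;
-- objective: simpler.

-- shared helper: s.rstrip(c) for a single strip character (exact for Python's rstrip with a 1-char argument)
def pyRstrip1 (s : String) (c : Char) : String :=
  String.ofList ((s.toList.reverse.dropWhile (fun x => x == c)).reverse)

-- ===== PORT A =====
def ExtractFsMaskFromOldCommand (old_command : String) : String × String :=
  let old_command_lst := (PySem.Str.split? old_command " ").getD []
  let fs_arg_indexes_lst :=
    ((PySem.List.enumerate old_command_lst).filter (fun p => p.2 == "-floorsweep")).map (fun p => p.1)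
  let fs_arg_str :=
    fs_arg_indexes_lst.foldl
      (fun acc index =>
        if index + 1 < (old_command_lst.length : Int) then
          acc ++ PySem.List.pyGetD old_command_lst (index + 1) "" ++ ":"
        else acc) ""
  let fs_arg_str := pyRstrip1 fs_arg_str ':'
  let old_command_without_fs :=
    (PySem.List.pyRange 0 old_command_lst.length).foldl
      (fun acc i =>
        if fs_arg_indexes_lst.contains i || fs_arg_indexes_lst.contains (i - 1) then acc
        else acc ++ PySem.List.pyGetD old_command_lst i "" ++ " ") ""
  let old_command_without_fs := pyRstrip1 old_command_without_fs ' '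
  (fs_arg_str, old_command_without_fs)

-- ===== PORT B =====
def ExtractFsMaskFromOldCommand_alt (old_command : String) : String × String :=
  let toks := (PySem.Str.split? old_command " ").getD []
  let st :=
    toks.foldl
      (fun (st : String × String × String) tok =>
        (if st.2.2 == "-floorsweep" then st.1 ++ tok ++ ":" else st.1,
         if tok != "-floorsweep" && st.2.2 != "-floorsweep" then st.2.1 ++ tok ++ " " else st.2.1,
         tok))
      ("", "", "")
  (pyRstrip1 st.1 ':', pyRstrip1 st.2.1 ' ')

-- ===== PRECONDITION & SPEC =====
def Spec_ExtractFsMaskFromOldCommand (old_command : String) (out : String × String) : Prop := out = ExtractFsMaskFromOldCommand_alt old_command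
instance (old_command : String) (out : String × String) : Decidable (Spec_ExtractFsMaskFromOldCommand old_command out) := by unfold Spec_ExtractFsMaskFromOldCommand; infer_instance

-- ===== CLAIM (what is proved, stated in full; the proofs are below) =====
def Claim_equal_ExtractFsMaskFromOldCommand : Prop := ∀ (old_command : String), Dom_ExtractFsMaskFromOldCommand old_command → Spec_ExtractFsMaskFromOldCommand old_command (ExtractFsMaskFromOldCommand old_command)

-- ===== LEMMAS AND PROOFS =====

-- concatenation of a list of strings
def sJoin : List String → String
  | [] => ""
  | s :: l => s ++ sJoin l

-- B's fs accumulator as a structural recursion over (prev, tokens)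
def fsB (prev : String) : List String → String
  | [] => ""
  | t :: ts => (if prev == "-floorsweep" then t ++ ":" else "") ++ fsB t ts

-- B's command accumulator as a structural recursion over (prev, tokens)
def cmdB (prev : String) : List String → String
  | [] => ""
  | t :: ts => (if t != "-floorsweep" && prev != "-floorsweep" then t ++ " " else "") ++ cmdB t ts

-- A's fs string, phrased with a lookahead on the token list
def fsC : List String → String
  | [] => ""
  | t :: ts =>
    (if t == "-floorsweep" then (match ts with | [] => "" | u :: _ => u ++ ":") else "") ++ fsC ts

theorem foldl_acc_append_if_prop {α : Type} (l : List α) (p : α → Prop) [DecidablePred p] (f : α → String) (a : String) :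
    l.foldl (fun acc x => if p x then acc ++ f x else acc) a
      = a ++ sJoin (l.map (fun x => if p x then f x else "")) := by
  induction l generalizing a with
  | nil => simp [sJoin]
  | cons x xs ih =>
    simp only [List.foldl_cons, List.map_cons, sJoin]
    by_cases h : p x
    · simp [h, ih, String.append_assoc]
    · simp [h, ih]

theorem foldl_acc_append_unless {α : Type} (l : List α) (c : α → Bool) (f : α → String) (a : String) :
    l.foldl (fun acc x => if c x then acc else acc ++ f x) a
      = a ++ sJoin (l.map (fun x => if c x then "" else f x)) := by
  induction l generalizing a with
  | nil => simp [sJoin]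
  | cons x xs ih =>
    simp only [List.foldl_cons, List.map_cons, sJoin]
    by_cases h : c x = true
    · simp [h, ih]
    · simp [h, ih, String.append_assoc]

theorem fsB_eq_fsC (toks : List String) (prev : String) :
    fsB prev toks
      = (if prev == "-floorsweep" then (match toks with | [] => "" | u :: _ => u ++ ":") else "")
        ++ fsC toks := by
  induction toks generalizing prev with
  | nil => simp [fsB, fsC]
  | cons t ts ih => simp [fsB, fsC, ih t]

theorem foldB_unfold (toks : List String) (fs cmd prev : String) :
    toks.foldl
      (fun (st : String × String × String) tok =>
        (if st.2.2 == "-floorsweep" then st.1 ++ tok ++ ":" else st.1,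
         if tok != "-floorsweep" && st.2.2 != "-floorsweep" then st.2.1 ++ tok ++ " " else st.2.1,
         tok))
      (fs, cmd, prev)
    = (fs ++ fsB prev toks, cmd ++ cmdB prev toks, toks.getLastD prev) := by
  induction toks generalizing fs cmd prev with
  | nil => simp [fsB, cmdB]
  | cons t ts ih =>
    simp only [List.foldl_cons, fsB, cmdB, ih, List.getLastD_cons]
    by_cases h1 : prev == "-floorsweep" <;> by_cases h2 : (t != "-floorsweep" && prev != "-floorsweep") = true <;>
      simp [h1, h2, String.append_assoc]

theorem pyGetD_append_len (pre toks : List String) :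
    PySem.List.pyGetD (pre ++ toks) (pre.length : Int) "" = toks.headD "" := by
  rw [PySem.List.pyGetD_natCast]
  cases toks with
  | nil => simp [List.getD]
  | cons u us => simp [List.getD_eq_getElem?_getD]

theorem pyGetD_append_last (pre toks : List String) (h : pre ≠ []) :
    PySem.List.pyGetD (pre ++ toks) ((pre.length : Int) - 1) "" = pre.getLastD "" := by
  have hl : 0 < pre.length := List.length_pos_of_ne_nil h
  have : ((pre.length : Int) - 1) = ((pre.length - 1 : Nat) : Int) := by omega
  rw [this, PySem.List.pyGetD_natCast]
  rw [List.getD_eq_getElem?_getD, List.getElem?_append_left (by omega)]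
  simp [List.getElem?_eq_getElem (by omega : pre.length - 1 < pre.length),
        List.getLastD_eq_getLast?, List.getLast?_eq_getElem?]

theorem mem_fsIdx (lst : List String) (i : Int) :
    i ∈ ((PySem.List.enumerate lst).filter (fun p => p.2 == "-floorsweep")).map (fun p => p.1)
    ↔ 0 ≤ i ∧ i < (lst.length : Int) ∧ PySem.List.pyGetD lst i "" = "-floorsweep" := by
  simp only [List.mem_map, List.mem_filter, PySem.List.mem_enumerate_iff]
  constructor
  · rintro ⟨p, ⟨⟨k, hk, rfl⟩, hfw⟩, rfl⟩
    simp only [beq_iff_eq] at hfw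
    refine ⟨by omega, by simpa using hk, ?_⟩
    simp only [zero_add]
    rw [PySem.List.pyGetD_natCast, List.getD_eq_getElem?_getD, List.getElem?_eq_getElem hk]
    simpa using hfw
  · rintro ⟨h0, hn, hfw⟩
    have hi : i = ((i.toNat : Nat) : Int) := by omega
    have hk : i.toNat < lst.length := by omega
    have hval : PySem.List.pyGetD lst i "" = lst[i.toNat] := by
      conv_lhs => rw [hi]
      rw [PySem.List.pyGetD_natCast, List.getD_eq_getElem?_getD, List.getElem?_eq_getElem hk]
      simp
    refine ⟨(i, PySem.List.pyGetD lst i ""), ⟨⟨i.toNat, hk, by rw [hval]; exact Prod.ext (by omega) rfl⟩, by simpa using hfw⟩, rfl⟩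

theorem fs_join (pre toks : List String) :
    sJoin (((PySem.List.enumerate toks (pre.length : Int)).filter (fun p => p.2 == "-floorsweep")).map
      (fun p => if p.1 + 1 < (((pre ++ toks).length : Nat) : Int)
                then PySem.List.pyGetD (pre ++ toks) (p.1 + 1) "" ++ ":" else ""))
      = fsC toks := by
  induction toks generalizing pre with
  | nil => simp [sJoin, fsC, PySem.List.enumerate]
  | cons t ts ih =>
    have hassoc : (pre ++ [t]) ++ ts = pre ++ t :: ts := by simp
    have h2 := ih (pre ++ [t])
    rw [hassoc] at h2
    have hlen : ((pre ++ [t]).length : Int) = (pre.length : Int) + 1 := by simp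
    rw [hlen] at h2
    rw [PySem.List.enumerate_cons]
    by_cases ht : (t == "-floorsweep") = true
    · rw [List.filter_cons_of_pos (by simpa using ht)]
      simp only [List.map_cons, sJoin]
      rw [h2]
      have hval : PySem.List.pyGetD (pre ++ t :: ts) ((pre.length : Int) + 1) "" = ts.headD "" := by
        have := pyGetD_append_len (pre ++ [t]) ts
        rw [hassoc, hlen] at this
        exact this
      cases ts with
      | nil =>
        have hguard : ¬ ((pre.length : Int) + 1 < (((pre ++ [t]).length : Nat) : Int)) := by
          simp
        simp only [fsC, ht, if_pos, hguard]
        simp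
      | cons u us =>
        have hguard : ((pre.length : Int) + 1 < (((pre ++ t :: u :: us).length : Nat) : Int)) := by
          simp
        simp only [fsC, hguard, if_pos, hval]
        simp [ht]
    · rw [List.filter_cons_of_neg (by simpa using ht)]
      rw [h2]
      simp [fsC, ht]

theorem cmd_join (pre toks : List String) :
    sJoin ((PySem.List.pyRange (pre.length : Int) (((pre ++ toks).length : Nat) : Int)).map
      (fun i =>
        if (PySem.List.pyGetD (pre ++ toks) i "" == "-floorsweep")
            || (decide (1 ≤ i) && PySem.List.pyGetD (pre ++ toks) (i - 1) "" == "-floorsweep")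
        then "" else PySem.List.pyGetD (pre ++ toks) i "" ++ " "))
      = cmdB (pre.getLastD "") toks := by
  induction toks generalizing pre with
  | nil =>
    rw [PySem.List.pyRange_one_eq_nil (by simp)]
    simp [sJoin, cmdB]
  | cons t ts ih =>
    have hassoc : (pre ++ [t]) ++ ts = pre ++ t :: ts := by simp
    have h2 := ih (pre ++ [t])
    rw [hassoc] at h2
    have hlen : ((pre ++ [t]).length : Int) = (pre.length : Int) + 1 := by simp
    rw [hlen] at h2
    have hlast : (pre ++ [t]).getLastD "" = t := by simp
    rw [hlast] at h2
    rw [PySem.List.pyRange_one_cons (by simp)]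
    simp only [List.map_cons, sJoin]
    rw [h2]
    have hcur : PySem.List.pyGetD (pre ++ t :: ts) (pre.length : Int) "" = t := by
      rw [pyGetD_append_len]; rfl
    have hprev : (decide (1 ≤ (pre.length : Int)) && PySem.List.pyGetD (pre ++ t :: ts) ((pre.length : Int) - 1) "" == "-floorsweep")
        = (pre.getLastD "" == "-floorsweep") := by
      cases pre with
      | nil => simp
      | cons p ps =>
        rw [pyGetD_append_last _ _ (by simp)]
        simp
    rw [hcur, hprev]
    simp only [cmdB, List.getLastD_eq_getLast?]
    by_cases h1 : t = "-floorsweep" <;> by_cases h2p : pre.getLast?.getD "" = "-floorsweep" <;>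
      simp [h1, h2p]

-- ===== VERDICT (by name: the statement is the Claim_ definition above) =====
theorem ExtractFsMaskFromOldCommand_spec : Claim_equal_ExtractFsMaskFromOldCommand := by
  intro s _
  unfold Spec_ExtractFsMaskFromOldCommand ExtractFsMaskFromOldCommand ExtractFsMaskFromOldCommand_alt
  dsimp only
  set lst := (PySem.Str.split? s " ").getD [] with hlst
  set fsIdx := ((PySem.List.enumerate lst).filter (fun p => p.2 == "-floorsweep")).map (fun p => p.1) with hfsIdx
  -- B side
  rw [foldB_unfold]
  -- A side, fs string
  have hAfun : (fun (acc : String) (index : Int) =>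
      if index + 1 < (lst.length : Int) then acc ++ PySem.List.pyGetD lst (index + 1) "" ++ ":" else acc)
      = (fun acc index =>
      if index + 1 < (lst.length : Int) then acc ++ (PySem.List.pyGetD lst (index + 1) "" ++ ":") else acc) := by
    funext acc i
    by_cases h : i + 1 < (lst.length : Int) <;> simp [h, String.append_assoc]
  rw [hAfun, foldl_acc_append_if_prop]
  have hfs := fs_join [] lst
  simp only [List.nil_append, List.length_nil, Nat.cast_zero] at hfs
  rw [List.map_map] at *
  have hfs' : sJoin (List.map ((fun i : Int =>
      if i + 1 < (lst.length : Int) then PySem.List.pyGetD lst (i + 1) "" ++ ":" else "") ∘ (fun p : Int × String => p.1))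
      ((PySem.List.enumerate lst).filter (fun p => p.2 == "-floorsweep"))) = fsC lst := by
    rw [← hfs]; rfl
  -- A side, command string
  have hcondmap : List.map (fun i : Int => if fsIdx.contains i || fsIdx.contains (i - 1) then "" else PySem.List.pyGetD lst i "" ++ " ")
        (PySem.List.pyRange 0 (lst.length : Int))
      = List.map (fun i : Int =>
        if (PySem.List.pyGetD lst i "" == "-floorsweep")
            || (decide (1 ≤ i) && PySem.List.pyGetD lst (i - 1) "" == "-floorsweep")
        then "" else PySem.List.pyGetD lst i "" ++ " ") (PySem.List.pyRange 0 (lst.length : Int)) := by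
    apply List.map_congr_left
    intro i hi
    rw [PySem.List.mem_pyRange_one] at hi
    have e1 : fsIdx.contains i = (PySem.List.pyGetD lst i "" == "-floorsweep") := by
      rw [Bool.eq_iff_iff]
      simp only [List.contains_iff_mem, hfsIdx, mem_fsIdx, beq_iff_eq]
      constructor
      · rintro ⟨_, _, h⟩; exact h
      · intro h; exact ⟨hi.1, hi.2, h⟩
    have e2 : fsIdx.contains (i - 1) = (decide (1 ≤ i) && PySem.List.pyGetD lst (i - 1) "" == "-floorsweep") := by
      rw [Bool.eq_iff_iff]
      simp only [List.contains_iff_mem, hfsIdx, mem_fsIdx, Bool.and_eq_true, beq_iff_eq, decide_eq_true_eq]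
      constructor
      · rintro ⟨h0, _, h⟩; exact ⟨by omega, h⟩
      · rintro ⟨h1, h⟩; exact ⟨by omega, by omega, h⟩
    rw [e1, e2]
  have hCfun : (fun (acc : String) (i : Int) =>
      if fsIdx.contains i || fsIdx.contains (i - 1) then acc
      else acc ++ PySem.List.pyGetD lst i "" ++ " ")
      = (fun (acc : String) (i : Int) =>
      if fsIdx.contains i || fsIdx.contains (i - 1) then acc
      else acc ++ (PySem.List.pyGetD lst i "" ++ " ")) := by
    funext acc i
    by_cases h : (fsIdx.contains i || fsIdx.contains (i - 1)) = true <;> simp [String.append_assoc]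
  rw [hCfun, foldl_acc_append_unless, hcondmap]
  have hcmd := cmd_join [] lst
  simp only [List.nil_append, List.length_nil, Nat.cast_zero, List.getLastD_nil] at hcmd
  rw [hcmd]
  -- combine
  rw [hfs', fsB_eq_fsC]
  simp
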